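-- pv_equiv track=rewrite | github.com/marco-raim/homework-big-data | homework1.py | gather_prod_cust
-- ===== SOURCE A (Python) =====
-- def gather_prod_cust(pairs):
--     pairs_quant = dict()
--     # sum all quantities
--     for p in pairs[0]:
--         if p not in pairs_quant.keys():
--             pairs_quant[p] = pairs[1]
--         else:
--             pairs_quant[p] = pairs_quant[p] + pairs[1]
--     return [(key[0], key[1]) for key in pairs_quant.keys() if pairs_quant[key] > 0]
-- ===== SOURCE B (Python) =====
-- def gather_prod_cust(pairs):
--     # Each key's accumulated sum is count*pairs[1] with count >= 1, so the
--     # ">0" filter keeps either every distinct key or none of them.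
--     keys = list(dict.fromkeys(pairs[0]))
--     if keys and pairs[1] > 0:
--         return keys
--     return []
-- ===== Notes on version B (the rewrite author's own statement) =====
-- stated objective: simpler
-- what changed: B drops A's dict of accumulated per-key sums entirely: since every key's sum is occurrence-count times the constant pairs[1], B just dedups pairs[0] in first-appearance order and returns it when pairs[1] > 0, else [].
import Mathlib
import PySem

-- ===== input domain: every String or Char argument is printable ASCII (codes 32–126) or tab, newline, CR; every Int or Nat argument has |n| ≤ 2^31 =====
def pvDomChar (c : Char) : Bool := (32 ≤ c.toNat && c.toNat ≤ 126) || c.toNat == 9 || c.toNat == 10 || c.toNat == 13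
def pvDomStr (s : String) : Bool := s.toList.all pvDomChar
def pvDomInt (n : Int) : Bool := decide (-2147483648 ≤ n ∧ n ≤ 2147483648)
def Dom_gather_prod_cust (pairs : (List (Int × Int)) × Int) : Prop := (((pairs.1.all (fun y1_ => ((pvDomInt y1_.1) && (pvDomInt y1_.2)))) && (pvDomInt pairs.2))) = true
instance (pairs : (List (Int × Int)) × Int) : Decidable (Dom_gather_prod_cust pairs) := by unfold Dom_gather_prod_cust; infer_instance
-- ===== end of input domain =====

-- B replaces A's dict of accumulated sums by a single ordered dedup plus one
-- sign test on pairs.2 (simpler; same asymptotic cost).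


-- ===== PORT A =====
-- the loop body of A: first-time keys get pairs[1], repeated keys accumulate
def gatherStep (q : Int) (d : PySem.Dict (Int × Int) Int) (p : Int × Int) :
    PySem.Dict (Int × Int) Int :=
  if d.contains p = false then d.insert p q
  else d.insert p (d.getD p 0 + q)

def gather_prod_cust (pairs : (List (Int × Int)) × Int) : List (Int × Int) :=
  let pairs_quant := pairs.1.foldl (gatherStep pairs.2) PySem.Dict.empty
  (pairs_quant.keys.filter (fun key => pairs_quant.getD key 0 > 0)).map
    (fun key => (key.1, key.2))

-- ===== PORT B =====
def gather_prod_cust_alt (pairs : (List (Int × Int)) × Int) : List (Int × Int) :=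
  let keys := PySem.List.dedup pairs.1
  if keys ≠ [] ∧ pairs.2 > 0 then keys else []

-- ===== PRECONDITION & SPEC =====
def Spec_gather_prod_cust (pairs : (List (Int × Int)) × Int) (out : List (Int × Int)) : Prop := out = gather_prod_cust_alt pairs
instance (pairs : (List (Int × Int)) × Int) (out : List (Int × Int)) : Decidable (Spec_gather_prod_cust pairs out) := by unfold Spec_gather_prod_cust; infer_instance

-- ===== CLAIM (what is proved, stated in full; the proofs are below) =====
def Claim_equal_gather_prod_cust : Prop := ∀ (pairs : (List (Int × Int)) × Int), Dom_gather_prod_cust pairs → Spec_gather_prod_cust pairs (gather_prod_cust pairs)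

-- ===== LEMMAS AND PROOFS =====

-- invariant: every stored value is positive iff q is positive
def GatherInv (q : Int) (d : PySem.Dict (Int × Int) Int) : Prop :=
  ∀ k, d.contains k = true → (0 < d.getD k 0 ↔ 0 < q)

lemma gatherStep_keys (q : Int) (d : PySem.Dict (Int × Int) Int) (p : Int × Int) :
    (gatherStep q d p).keys = PySem.Set.add d.keys p := by
  unfold gatherStep PySem.Set.add
  by_cases h : d.contains p = true
  · rw [if_neg (by simp [h]), PySem.Dict.keys_insert_of_contains _ _ h,
      if_pos (by simpa [List.contains_iff_mem, ← PySem.Dict.contains_iff_mem_keys] using h)]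
  · have h' : d.contains p = false := by simpa using h
    rw [if_pos h', PySem.Dict.keys_insert_of_not_contains _ _ h',
      if_neg (by simp [← PySem.Dict.contains_iff_mem_keys, h'])]

lemma gatherStep_nodup (q : Int) (d : PySem.Dict (Int × Int) Int) (p : Int × Int)
    (h : d.keys.Nodup) : (gatherStep q d p).keys.Nodup := by
  unfold gatherStep; split <;> exact PySem.Dict.nodup_keys_insert _ _ _ h

lemma gatherStep_inv (q : Int) (d : PySem.Dict (Int × Int) Int) (p : Int × Int)
    (h : GatherInv q d) : GatherInv q (gatherStep q d p) := by
  intro k hk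
  unfold gatherStep at hk ⊢
  by_cases hc : d.contains p = true
  · rw [if_neg (by simp [hc])] at hk ⊢
    rw [PySem.Dict.getD_insert]
    split
    · have := h p hc
      constructor <;> intro <;> omega
    · next hne =>
      apply h
      have := PySem.Dict.contains_insert d p k (d.getD p 0 + q)
      rw [hk] at this
      rcases (by simpa using this.symm : k = p ∨ d.contains k = true) with h1 | h1
      · exact absurd h1 hne
      · exact h1
  · have hc' : d.contains p = false := by simpa using hc
    rw [if_pos hc'] at hk ⊢
    rw [PySem.Dict.getD_insert]
    split
    · exact Iff.rfl
    · next hne =>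
      apply h
      have := PySem.Dict.contains_insert d p k q
      rw [hk] at this
      rcases (by simpa using this.symm : k = p ∨ d.contains k = true) with h1 | h1
      · exact absurd h1 hne
      · exact h1

lemma gather_loop (q : Int) :
    ∀ (xs : List (Int × Int)) (d : PySem.Dict (Int × Int) Int),
      d.keys.Nodup → GatherInv q d →
      (xs.foldl (gatherStep q) d).keys = xs.foldl PySem.Set.add d.keys
        ∧ (xs.foldl (gatherStep q) d).keys.Nodup
        ∧ GatherInv q (xs.foldl (gatherStep q) d) := by
  intro xs
  induction xs with
  | nil => intro d hn hi; exact ⟨rfl, hn, hi⟩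
  | cons p xs ih =>
    intro d hn hi
    have h1 := ih (gatherStep q d p) (gatherStep_nodup q d p hn) (gatherStep_inv q d p hi)
    simpa [List.foldl_cons, gatherStep_keys q d p] using h1

lemma map_eta (l : List (Int × Int)) : l.map (fun key => (key.1, key.2)) = l := by
  simp

-- ===== VERDICT (by name: the statement is the Claim_ definition above) =====
theorem gather_prod_cust_spec : Claim_equal_gather_prod_cust := by
  intro pairs _
  unfold Spec_gather_prod_cust gather_prod_cust gather_prod_cust_alt
  obtain ⟨xs, q⟩ := pairs
  have hstart : (PySem.Dict.empty : PySem.Dict (Int × Int) Int).keys.Nodup :=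
    PySem.Dict.nodup_keys_empty
  have hinv : GatherInv q (PySem.Dict.empty : PySem.Dict (Int × Int) Int) := by
    intro k hk; simp [PySem.Dict.contains_empty] at hk
  obtain ⟨hkeys, hnodup, hfin⟩ := gather_loop q xs PySem.Dict.empty hstart hinv
  set pq := xs.foldl (gatherStep q) PySem.Dict.empty with hpq
  have hdedup : pq.keys = PySem.List.dedup xs := by
    rw [hkeys]; rfl
  simp only [map_eta]
  by_cases hq : 0 < q
  · have hall : pq.keys.filter (fun key => pq.getD key 0 > 0) = pq.keys := by
      apply List.filter_eq_self.mpr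
      intro k hk
      have hc : pq.contains k = true := (PySem.Dict.contains_iff_mem_keys pq k).mpr hk
      simpa using (hfin k hc).mpr hq
    rw [hall, hdedup]
    rcases h0 : PySem.List.dedup xs with _ | ⟨a, l⟩
    · simp
    · rw [if_pos ⟨by simp, hq⟩]
  · have hnone : pq.keys.filter (fun key => pq.getD key 0 > 0) = [] := by
      apply List.filter_eq_nil_iff.mpr
      intro k hk
      have hc : pq.contains k = true := (PySem.Dict.contains_iff_mem_keys pq k).mpr hk
      simp only [gt_iff_lt, decide_eq_true_eq]
      exact fun hpos => hq ((hfin k hc).mp hpos)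
    rw [hnone, if_neg (by rintro ⟨-, h⟩; exact hq h)]
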